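-- pv_equiv track=rewrite | github.com/dtd2512/AOC2023 | day13/day13_lib.py | find_mirror
-- ===== SOURCE A (Python) =====
-- def count_diff(left, right: list):
--     return len([(i,j) for i,j in zip(left, right) if i!=j])
--
-- def find_mirror(pattern: list, num_smudge: int):
--     for c in range(1, len(pattern[0])):
--         total_diff = 0
--         for r in range(len(pattern)):
--             left = pattern[r][:c][::-1]
--             right = pattern[r][c:]
--             m = min(len(left), len(right))
--             total_diff += count_diff(left[:m], right[:m])
--         if total_diff == num_smudge: return c
--     return 0
-- ===== SOURCE B (Python) =====
-- def find_mirror(pattern: list, num_smudge: int):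
--     width = len(pattern[0])
--     for c in range(1, width):
--         total = 0
--         for row in pattern:
--             n = len(row)
--             k = 0
--             while k < c and c + k < n:
--                 if row[c - 1 - k] != row[c + k]:
--                     total += 1
--                 k += 1
--         if total == num_smudge:
--             return c
--     return 0
-- ===== Notes on version B (the rewrite author's own statement) =====
-- stated objective: faster
-- what changed: Replaces A's per-row reversed-prefix/suffix slicing plus zip-based diff counting with a direct outward two-index walk over the mirror column pairs (c-1-k, c+k), counting mismatches in place and allocating no intermediate slice/reversed copies.
import Mathlib
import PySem

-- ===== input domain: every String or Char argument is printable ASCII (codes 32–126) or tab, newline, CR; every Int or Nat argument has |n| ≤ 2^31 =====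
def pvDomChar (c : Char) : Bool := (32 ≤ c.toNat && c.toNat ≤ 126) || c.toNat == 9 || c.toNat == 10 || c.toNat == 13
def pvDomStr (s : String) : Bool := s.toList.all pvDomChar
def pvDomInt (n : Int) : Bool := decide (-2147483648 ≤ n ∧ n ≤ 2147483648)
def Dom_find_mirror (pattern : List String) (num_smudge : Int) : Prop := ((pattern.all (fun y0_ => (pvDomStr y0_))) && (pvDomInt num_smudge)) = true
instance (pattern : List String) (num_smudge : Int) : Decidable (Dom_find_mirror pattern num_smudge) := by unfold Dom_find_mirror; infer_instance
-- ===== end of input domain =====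

-- B replaces A's per-row reversed-slice construction by an outward two-index walk over column
-- pairs (c-1-k, c+k) counting character mismatches directly (objective: faster by a constant factor: no per-row slice/reverse copies).

-- ===== PORT A =====
def count_diff (left right : List Char) : Int :=
  PySem.List.len ((left.zip right).filter (fun p => p.1 != p.2))

-- the body of A's inner 'for r' loop: td + count_diff(left[:m], right[:m])
def a_row_step (c td : Int) (s : String) : Int :=
  let left := (PySem.List.slice s.toList none (some c)).reverse
  let right := PySem.List.slice s.toList (some c) none
  let m := min (PySem.List.len left) (PySem.List.len right)
  td + count_diff (PySem.List.slice left none (some m)) (PySem.List.slice right none (some m))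

def find_mirror_go (pattern : List String) (num_smudge : Int) : List Int → Int
  | [] => 0
  | c :: cs =>
    let total_diff := (PySem.List.pyRange 0 (PySem.List.len pattern) 1).foldl
      (fun td r => a_row_step c td (PySem.List.pyGetD pattern r "")) 0
    if total_diff == num_smudge then c else find_mirror_go pattern num_smudge cs

def find_mirror (pattern : List String) (num_smudge : Int) : Int :=
  find_mirror_go pattern num_smudge
    (PySem.List.pyRange 1 (PySem.List.len (PySem.List.pyGetD pattern 0 "").toList) 1)

-- ===== PORT B =====
-- the inner while loop of B: walk offset k outward while both indices stay in bounds
def walk_pairs (row : List Char) (c k total : Int) : Int :=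
  if h : k < c ∧ c + k < (row.length : Int) then
    walk_pairs row c (k + 1)
      (if PySem.List.pyGetD row (c - 1 - k) ' ' != PySem.List.pyGetD row (c + k) ' ' then
        total + 1 else total)
  else total
termination_by ((row.length : Int) - (c + k)).toNat
decreasing_by omega

def find_mirror_alt_go (pattern : List String) (num_smudge : Int) : List Int → Int
  | [] => 0
  | c :: cs =>
    let total := pattern.foldl (fun t row => walk_pairs row.toList c 0 t) 0
    if total == num_smudge then c else find_mirror_alt_go pattern num_smudge cs

def find_mirror_alt (pattern : List String) (num_smudge : Int) : Int :=
  let width := PySem.List.len (PySem.List.pyGetD pattern 0 "").toList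
  find_mirror_alt_go pattern num_smudge (PySem.List.pyRange 1 width 1)

-- ===== PRECONDITION & SPEC =====
-- A evaluates pattern[0]: it raises IndexError on the empty list, so Pre_ requires a nonempty pattern.
def Pre_find_mirror (pattern : List String) (num_smudge : Int) : Prop := pattern ≠ []
instance (pattern : List String) (num_smudge : Int) : Decidable (Pre_find_mirror pattern num_smudge) := by
  unfold Pre_find_mirror; infer_instance

def pvWitness_find_mirror : List String × Int := (["#.#"], 0)

def Spec_find_mirror (pattern : List String) (num_smudge : Int) (out : Int) : Prop := out = find_mirror_alt pattern num_smudge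
instance (pattern : List String) (num_smudge : Int) (out : Int) : Decidable (Spec_find_mirror pattern num_smudge out) := by unfold Spec_find_mirror; infer_instance

-- ===== CLAIM (what is proved, stated in full; the proofs are below) =====
def Claim_equal_find_mirror : Prop := ∀ (pattern : List String) (num_smudge : Int), Dom_find_mirror pattern num_smudge → Pre_find_mirror pattern num_smudge → Spec_find_mirror pattern num_smudge (find_mirror pattern num_smudge)

-- ===== LEMMAS AND PROOFS =====

-- the list of mirror pairs of characters at split c: element k is (row[c-1-k], row[c+k])
def pairsL (row : List Char) (cn : Nat) : List (Char × Char) :=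
  ((row.take cn).reverse).zip (row.drop cn)

lemma getElem_idx_congr {α : Type} (l : List α) {i j : Nat} (h : i = j) (hi : i < l.length) :
    l[i]'hi = l[j]'(h ▸ hi) := by subst h; rfl

lemma pairsL_length (row : List Char) (cn : Nat) :
    (pairsL row cn).length = min (min cn row.length) (row.length - cn) := by
  simp [pairsL]

lemma zip_take_take {α : Type} (a b : List α) (n : Nat) :
    (a.take n).zip (b.take n) = (a.zip b).take n := by
  induction a generalizing b n with
  | nil => simp
  | cons x xs ih =>
    cases b with
    | nil => simp
    | cons y ys =>
      cases n with
      | zero => simp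
      | succ m => simp [ih]

-- A's per-row contribution equals the mismatch count over pairsL
lemma rowA_eq (s : String) (c : Int) (hc : 0 ≤ c) (td : Int) :
    a_row_step c td s
      = td + ((pairsL s.toList c.toNat).countP (fun p => p.1 != p.2) : Int) := by
  unfold a_row_step count_diff
  rw [PySem.List.slice_to s.toList hc, PySem.List.slice_from s.toList hc]
  simp only [PySem.List.len_eq]
  set L := (s.toList.take c.toNat).reverse with hLdef
  set R := s.toList.drop c.toNat with hRdef
  have hm0 : (0:Int) ≤ min (L.length : Int) (R.length : Int) := by omega
  rw [PySem.List.slice_to L hm0, PySem.List.slice_to R hm0]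
  have hmt : (min (L.length : Int) (R.length : Int)).toNat = min L.length R.length := by omega
  rw [hmt]
  have hz : (L.take (min L.length R.length)).zip (R.take (min L.length R.length)) = L.zip R := by
    rw [zip_take_take]
    exact List.take_of_length_le (by simp)
  rw [hz]
  have : pairsL s.toList c.toNat = L.zip R := rfl
  rw [this, List.countP_eq_length_filter]

-- B's walk adds the mismatch count of the remaining pairs
lemma walk_pairs_eq (row : List Char) (c : Int) (hc : 1 ≤ c) (k t : Int) :
    0 ≤ k →
    walk_pairs row c k t
      = t + (((pairsL row c.toNat).drop k.toNat).countP (fun p => p.1 != p.2) : Int) := by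
  fun_induction walk_pairs row c k t with
  | case1 k t h ih =>
    intro hk
    have hlen : k.toNat < (pairsL row c.toNat).length := by
      rw [pairsL_length]; omega
    have hcn : c.toNat < row.length := by omega
    have hkc : c.toNat + k.toNat < row.length := by omega
    have hdrop := List.drop_eq_getElem_cons hlen
    have hLlen : ((row.take c.toNat).reverse).length = c.toNat := by
      rw [List.length_reverse, List.length_take]; omega
    have hget1 : ((row.take c.toNat).reverse)[k.toNat]'(by rw [hLlen]; omega)
        = row[c.toNat - 1 - k.toNat]'(by omega) := by
      rw [List.getElem_reverse, List.getElem_take]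
      exact getElem_idx_congr row (by rw [List.length_take]; omega) _
    have hget : (pairsL row c.toNat)[k.toNat]'hlen
        = (row[c.toNat - 1 - k.toNat]'(by omega), row[c.toNat + k.toNat]'hkc) := by
      unfold pairsL
      rw [List.getElem_zip, hget1, List.getElem_drop]
    have hA : PySem.List.pyGetD row (c - 1 - k) ' ' = row[c.toNat - 1 - k.toNat]'(by omega) := by
      rw [PySem.List.pyGetD_eq_getElem row ' ' (by omega) (by omega)]
      exact getElem_idx_congr row (by omega) _
    have hB : PySem.List.pyGetD row (c + k) ' ' = row[c.toNat + k.toNat]'hkc := by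
      rw [PySem.List.pyGetD_eq_getElem row ' ' (by omega) (by omega)]
      exact getElem_idx_congr row (by omega) _
    rw [dite_eq_ite] at ih
    have hk1 : (k + 1).toNat = k.toNat + 1 := by omega
    rw [ih (by omega), hk1, hdrop, List.countP_cons, hget, hA, hB]
    dsimp only
    split_ifs with hne <;> push_cast <;> omega
  | case2 k t h =>
    intro hk
    have hnil : (pairsL row c.toNat).drop k.toNat = [] := by
      apply List.drop_eq_nil_of_le
      rw [pairsL_length]; omega
    rw [hnil]
    simp

-- per-row agreement: B's while loop computes exactly A's loop-body increment
lemma row_eq (s : String) (c : Int) (hc : 1 ≤ c) (t : Int) :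
    walk_pairs s.toList c 0 t = a_row_step c t s := by
  rw [rowA_eq s c (by omega) t]
  have h := walk_pairs_eq s.toList c hc 0 t (le_refl 0)
  simpa using h

lemma go_eq (pattern : List String) (num_smudge : Int) (cs : List Int)
    (hcs : ∀ c ∈ cs, 1 ≤ c) :
    find_mirror_go pattern num_smudge cs = find_mirror_alt_go pattern num_smudge cs := by
  induction cs with
  | nil => rfl
  | cons c cs ih =>
    have hc : 1 ≤ c := hcs c (by simp)
    simp only [find_mirror_go, find_mirror_alt_go]
    rw [PySem.List.foldl_pyRange_zero_pyGetD]
    have hfold : pattern.foldl (fun t row => walk_pairs row.toList c 0 t) 0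
        = pattern.foldl (fun td s => a_row_step c td s) 0 := by
      apply PySem.List.foldl_congr_mem
      intro a x hx
      exact row_eq x c hc a
    rw [hfold, ih (fun c' hc' => hcs c' (by simp [hc']))]

theorem find_mirror_eq_alt (pattern : List String) (num_smudge : Int) :
    find_mirror pattern num_smudge = find_mirror_alt pattern num_smudge := by
  unfold find_mirror find_mirror_alt
  exact go_eq pattern num_smudge _ (fun c hc => ((PySem.List.mem_pyRange_one).1 hc).1)

-- ===== VERDICT (by name: the statement is the Claim_ definition above) =====
theorem find_mirror_spec : Claim_equal_find_mirror := by
  intro pattern num_smudge _ _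
  exact find_mirror_eq_alt pattern num_smudge
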